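-- pv_equiv track=rewrite | github.com/lnunno/advent-of-code-2016 | day02/bathroom.py | get_cross_bathroom_code
-- ===== SOURCE A (Python) =====
-- cross_pad = [
--     ['0', '0', '1', '0', '0'],
--     ['0', '2', '3', '4', '0'],
--     ['5', '6', '7', '8', '9'],
--     ['0', 'A', 'B', 'C', '0'],
--     ['0', '0', 'D', '0', '0'],
-- ]
--
-- def get_cross_bathroom_code(lines):
--     x, y = (0, 2)
--     start_index = (x, y)
--     s = ''
--     for line in lines:
--         for char in line.strip():
--             if char == 'U':
--                 ny = max(0, y-1)
--                 y = ny if cross_pad[ny][x] != '0' else y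
--             elif char == 'D':
--                 ny = min(4, y+1)
--                 y = ny if cross_pad[ny][x] != '0' else y
--             elif char == 'R':
--                 nx = min(4, x+1)
--                 x = nx if cross_pad[y][nx] != '0' else x
--             elif char == 'L':
--                 nx = max(0, x-1)
--                 x = nx if cross_pad[y][nx] != '0' else x
--             else:
--                 raise Exception('Invalid direction {}'.format(char))
--         s += str(cross_pad[y][x])
--     return s
-- ===== SOURCE B (Python) =====
-- # Idiomatic rewrite: a literal neighbor map keyed by (key, direction); the current
-- # state is the key character itself instead of (x, y) coordinates on a grid.
-- DIRECTIONS = 'UDLR'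
--
-- NEIGHBOR = {
--     ('1', 'D'): '3',
--     ('2', 'R'): '3', ('2', 'D'): '6',
--     ('3', 'U'): '1', ('3', 'L'): '2', ('3', 'R'): '4', ('3', 'D'): '7',
--     ('4', 'L'): '3', ('4', 'D'): '8',
--     ('5', 'R'): '6',
--     ('6', 'U'): '2', ('6', 'L'): '5', ('6', 'R'): '7', ('6', 'D'): 'A',
--     ('7', 'U'): '3', ('7', 'L'): '6', ('7', 'R'): '8', ('7', 'D'): 'B',
--     ('8', 'U'): '4', ('8', 'L'): '7', ('8', 'R'): '9', ('8', 'D'): 'C',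
--     ('9', 'L'): '8',
--     ('A', 'U'): '6', ('A', 'R'): 'B',
--     ('B', 'U'): '7', ('B', 'L'): 'A', ('B', 'R'): 'C', ('B', 'D'): 'D',
--     ('C', 'U'): '8', ('C', 'L'): 'B',
--     ('D', 'U'): 'B',
-- }
--
-- def get_cross_bathroom_code(lines):
--     key = '5'
--     out = []
--     for line in lines:
--         for char in line.strip():
--             if char not in DIRECTIONS:
--                 raise Exception('Invalid direction {}'.format(char))
--             key = NEIGHBOR.get((key, char), key)
--         out.append(key)
--     return ''.join(out)
-- ===== Notes on version B (the rewrite author's own statement) =====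
-- stated objective: idiomatic
-- what changed: Replaces the (x,y) grid walk with clamping and '0'-cell checks by a single current-key character advanced through a literal (key,direction)->key neighbor map of the diamond pad, joining per-line keys at the end.
import Mathlib
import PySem

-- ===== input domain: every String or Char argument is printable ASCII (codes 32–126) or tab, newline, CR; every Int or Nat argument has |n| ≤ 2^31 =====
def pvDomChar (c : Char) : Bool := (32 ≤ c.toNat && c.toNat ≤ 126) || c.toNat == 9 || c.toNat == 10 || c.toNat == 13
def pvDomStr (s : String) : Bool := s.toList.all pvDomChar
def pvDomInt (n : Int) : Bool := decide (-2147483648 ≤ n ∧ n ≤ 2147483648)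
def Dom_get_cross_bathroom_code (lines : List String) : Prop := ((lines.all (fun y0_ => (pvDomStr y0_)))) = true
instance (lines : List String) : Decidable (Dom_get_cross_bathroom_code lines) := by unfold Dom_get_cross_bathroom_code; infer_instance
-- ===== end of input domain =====

-- B replaces A's (x,y) grid walk (clamping + '0'-cell checks) by a single current-key
-- character advanced through a literal (key,direction)->key neighbor map (idiomatic rewrite).

-- ===== PORT A =====
def crossPad : List (List Char) :=
  [['0', '0', '1', '0', '0'],
   ['0', '2', '3', '4', '0'],
   ['5', '6', '7', '8', '9'],
   ['0', 'A', 'B', 'C', '0'],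
   ['0', '0', 'D', '0', '0']]

-- cross_pad[y][x]; indices produced by A are always clamped into [0,4], so the
-- default '0' is never reached on any executed access.
def padGet (y x : Int) : Char :=
  (PySem.List.pyGet? ((PySem.List.pyGet? crossPad y).getD []) x).getD '0'

-- one character of A's inner loop; the final else-branch raises in Python
-- (excluded by Pre_), here it leaves the state unchanged
def stepA (st : Int × Int) (char : Char) : Int × Int :=
  let (x, y) := st
  if char = 'U' then
    let ny := max 0 (y - 1)
    (x, if padGet ny x ≠ '0' then ny else y)
  else if char = 'D' then
    let ny := min 4 (y + 1)
    (x, if padGet ny x ≠ '0' then ny else y)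
  else if char = 'R' then
    let nx := min 4 (x + 1)
    ((if padGet y nx ≠ '0' then nx else x), y)
  else if char = 'L' then
    let nx := max 0 (x - 1)
    ((if padGet y nx ≠ '0' then nx else x), y)
  else st

def get_cross_bathroom_code (lines : List String) : String :=
  -- the accumulated string s is represented by its character list, joined at the end
  let init : Int × Int × List Char := (0, 2, [])
  let fin := lines.foldl (fun (st : Int × Int × List Char) line =>
      let (x, y, s) := st
      let (x', y') := (PySem.Str.strip line).toList.foldl stepA (x, y)
      (x', y', s ++ [padGet y' x'])) init
  String.ofList fin.2.2

-- ===== PORT B =====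
def neighborMap : PySem.Dict (Char × Char) Char :=
  PySem.Dict.ofList
  [(('1','D'),'3'),
   (('2','R'),'3'), (('2','D'),'6'),
   (('3','U'),'1'), (('3','L'),'2'), (('3','R'),'4'), (('3','D'),'7'),
   (('4','L'),'3'), (('4','D'),'8'),
   (('5','R'),'6'),
   (('6','U'),'2'), (('6','L'),'5'), (('6','R'),'7'), (('6','D'),'A'),
   (('7','U'),'3'), (('7','L'),'6'), (('7','R'),'8'), (('7','D'),'B'),
   (('8','U'),'4'), (('8','L'),'7'), (('8','R'),'9'), (('8','D'),'C'),
   (('9','L'),'8'),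
   (('A','U'),'6'), (('A','R'),'B'),
   (('B','U'),'7'), (('B','L'),'A'), (('B','R'),'C'), (('B','D'),'D'),
   (('C','U'),'8'), (('C','L'),'B'),
   (('D','U'),'B')]

-- one character of B's inner loop; on a char not in DIRECTIONS Python raises
-- (excluded by Pre_), here the key is left unchanged (lookup misses anyway)
def stepB (key : Char) (char : Char) : Char :=
  (PySem.Dict.get? neighborMap (key, char)).getD key

def get_cross_bathroom_code_alt (lines : List String) : String :=
  let fin := lines.foldl (fun (st : Char × List Char) line =>
      let key := (PySem.Str.strip line).toList.foldl stepB st.1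
      (key, st.2 ++ [key])) ('5', [])
  String.ofList fin.2

-- ===== PRECONDITION & SPEC =====
-- A raises Exception('Invalid direction …') on any stripped character outside UDLR;
-- Pre_ admits exactly the inputs on which A returns.
def Pre_get_cross_bathroom_code (lines : List String) : Prop :=
  (lines.all (fun line =>
    (PySem.Str.strip line).toList.all (fun c => c ∈ (['U', 'D', 'L', 'R'] : List Char)))) = true
instance (lines : List String) : Decidable (Pre_get_cross_bathroom_code lines) := by
  unfold Pre_get_cross_bathroom_code; infer_instance

def pvWitness_get_cross_bathroom_code : List String := ["UL", "DR"]

def Spec_get_cross_bathroom_code (lines : List String) (out : String) : Prop :=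
  out = get_cross_bathroom_code_alt lines
instance (lines : List String) (out : String) : Decidable (Spec_get_cross_bathroom_code lines out) := by
  unfold Spec_get_cross_bathroom_code; infer_instance

-- ===== CLAIM (what is proved, stated in full; the proofs are below) =====
def Claim_equal_get_cross_bathroom_code : Prop :=
  ∀ (lines : List String), Dom_get_cross_bathroom_code lines →
    Pre_get_cross_bathroom_code lines →
    Spec_get_cross_bathroom_code lines (get_cross_bathroom_code lines)

-- ===== LEMMAS AND PROOFS =====

-- the 13 positions A can reach (keys of the diamond pad)
def validPos : List (Int × Int) :=
  [(2,0), (1,1), (2,1), (3,1), (0,2), (1,2), (2,2), (3,2), (4,2),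
   (1,3), (2,3), (3,3), (2,4)]

def keyOf (p : Int × Int) : Char := padGet p.2 p.1

-- one step of A simulates one step of B (finite check over 13 positions × 4 dirs)
set_option maxRecDepth 2000 in
theorem step_sim : ∀ p ∈ validPos, ∀ c ∈ (['U','D','L','R'] : List Char),
    stepA p c ∈ validPos ∧ keyOf (stepA p c) = stepB (keyOf p) c := by
  intro p hp c hc
  fin_cases hp <;> fin_cases hc <;> decide

theorem inner_sim (cs : List Char) (p : Int × Int) (hp : p ∈ validPos)
    (hcs : ∀ c ∈ cs, c ∈ (['U','D','L','R'] : List Char)) :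
    cs.foldl stepA p ∈ validPos ∧ keyOf (cs.foldl stepA p) = cs.foldl stepB (keyOf p) := by
  induction cs generalizing p with
  | nil => exact ⟨hp, rfl⟩
  | cons c cs ih =>
    have hc := hcs c (List.mem_cons_self ..)
    obtain ⟨h1, h2⟩ := step_sim p hp c hc
    have := ih (stepA p c) h1 (fun d hd => hcs d (List.mem_cons_of_mem _ hd))
    simpa [List.foldl_cons, h2] using this

theorem outer_sim (lines : List String)
    (hpre : ∀ line ∈ lines, ∀ c ∈ (PySem.Str.strip line).toList, c ∈ (['U','D','L','R'] : List Char))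
    (p : Int × Int) (hp : p ∈ validPos) (acc : List Char) :
    (lines.foldl (fun (st : Int × Int × List Char) line =>
        let (x, y, s) := st
        let (x', y') := (PySem.Str.strip line).toList.foldl stepA (x, y)
        (x', y', s ++ [padGet y' x'])) (p.1, p.2, acc)).2.2
    = (lines.foldl (fun (st : Char × List Char) line =>
        let key := (PySem.Str.strip line).toList.foldl stepB st.1
        (key, st.2 ++ [key])) (keyOf p, acc)).2 := by
  induction lines generalizing p acc with
  | nil => rfl
  | cons line rest ih =>
    have hline := hpre line (List.mem_cons_self ..)
    obtain ⟨h1, h2⟩ := inner_sim (PySem.Str.strip line).toList p hp hline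
    have hrest : ∀ l ∈ rest, ∀ c ∈ (PySem.Str.strip l).toList,
        c ∈ (['U','D','L','R'] : List Char) := fun l hl => hpre l (List.mem_cons_of_mem _ hl)
    set q := (PySem.Str.strip line).toList.foldl stepA p with hq
    have := ih hrest q h1 (acc ++ [keyOf q])
    simp only [List.foldl_cons]
    rw [show ((PySem.Str.strip line).toList.foldl stepA (p.1, p.2)) = q by rw [hq]]
    rw [show (padGet q.2 q.1) = keyOf q from rfl] at *
    rw [h2] at *
    exact this

-- ===== VERDICT (by name: the statement is the Claim_ definition above) =====
theorem get_cross_bathroom_code_spec : Claim_equal_get_cross_bathroom_code := by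
  intro lines _ hpre
  unfold Pre_get_cross_bathroom_code at hpre
  simp only [List.all_eq_true, decide_eq_true_eq] at hpre
  unfold Spec_get_cross_bathroom_code get_cross_bathroom_code get_cross_bathroom_code_alt
  have h := outer_sim lines hpre (0, 2) (by decide) []
  rw [show keyOf (0, 2) = '5' by decide] at h
  simpa using congrArg String.ofList h
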